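-- pv_equiv track=rewrite | github.com/pypi-data/pypi-mirror-372 | packages/mesh-to-sim-asset/mesh_to_sim_asset-0.1.3.tar.gz/mesh_to_sim_asset-0.1.3/mesh_to_sim_asset/usd_to_sdf.py | find_matching_gltf
-- ===== SOURCE A (Python) =====
-- def find_matching_gltf(mesh_name: str, gltf_mapping: dict[str, str]) -> str | None:
--     """Find the best matching GLTF file for a given mesh name.
--
--     Args:
--         mesh_name: The mesh name to match.
--         gltf_mapping: Dictionary mapping mesh names to GLTF paths.
--
--     Returns:
--         The matching GLTF path or None if no match is found.
--     """
--     # Strategy 1: Exact match.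
--     if mesh_name in gltf_mapping:
--         return gltf_mapping[mesh_name]
--
--     # Strategy 2: Case-insensitive exact match.
--     for key, value in gltf_mapping.items():
--         if key.lower() == mesh_name.lower():
--             return value
--
--     # Strategy 3: Substring match (both directions).
--     for key, value in gltf_mapping.items():
--         if mesh_name in key or key in mesh_name:
--             return value
--
--     # Strategy 4: Fuzzy matching with common variations.
--     mesh_variations = [
--         mesh_name,
--         mesh_name.replace("_", ""),
--         mesh_name.replace("-", ""),
--         mesh_name.replace(" ", ""),
--         mesh_name.lower(),
--         mesh_name.upper(),
--     ]
--
--     for variation in mesh_variations: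
--         for key, value in gltf_mapping.items():
--             key_variations = [
--                 key,
--                 key.replace("_", ""),
--                 key.replace("-", ""),
--                 key.replace(" ", ""),
--                 key.lower(),
--                 key.upper(),
--             ]
--
--             if variation in key_variations:
--                 return value
--
--     # Strategy 5: Partial match with common mesh naming patterns.
--     # Remove common prefixes and suffixes.
--     clean_mesh_name = mesh_name
--     for prefix in ["mesh_", "geometry_", "visual_", "collision_"]:
--         if clean_mesh_name.startswith(prefix):
--             clean_mesh_name = clean_mesh_name[len(prefix) :]
--
--     for suffix in ["_mesh", "_geometry", "_visual", "_collision"]: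
--         if clean_mesh_name.endswith(suffix):
--             clean_mesh_name = clean_mesh_name[: -len(suffix)]
--
--     # Try with cleaned name.
--     for key, value in gltf_mapping.items():
--         clean_key = key
--         for prefix in ["mesh_", "geometry_", "visual_", "collision_"]:
--             if clean_key.startswith(prefix):
--                 clean_key = clean_key[len(prefix) :]
--
--         for suffix in ["_mesh", "_geometry", "_visual", "_collision"]:
--             if clean_key.endswith(suffix):
--                 clean_key = clean_key[: -len(suffix)]
--
--         if (
--             clean_mesh_name == clean_key
--             or clean_mesh_name in clean_key
--             or clean_key in clean_mesh_name
--         ):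
--             return value
--
--     return None
-- ===== SOURCE B (Python) =====
-- def _clean(name):
--     for prefix in ["mesh_", "geometry_", "visual_", "collision_"]:
--         name = name.removeprefix(prefix)
--     for suffix in ["_mesh", "_geometry", "_visual", "_collision"]:
--         name = name.removesuffix(suffix)
--     return name
--
--
-- def find_matching_gltf(mesh_name: str, gltf_mapping: dict[str, str]) -> str | None:
--     """Single pass over gltf_mapping: keep, per matching strategy, the first
--     value whose key satisfies it, then return the slot of the highest-priority
--     strategy that fired (strategy 4 gets one slot per mesh-name variation to
--     preserve its variation-major search order). One pass instead of up to eight rescans."""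
--     ml = mesh_name.lower()
--     clean_mesh = _clean(mesh_name)
--     variations = [
--         mesh_name,
--         mesh_name.replace("_", ""),
--         mesh_name.replace("-", ""),
--         mesh_name.replace(" ", ""),
--         ml,
--         mesh_name.upper(),
--     ]
--
--     def key_variations(key):
--         return [
--             key,
--             key.replace("_", ""),
--             key.replace("-", ""),
--             key.replace(" ", ""),
--             key.lower(),
--             key.upper(),
--         ]
--
--     def clean_pred(key):
--         ck = _clean(key)
--         return clean_mesh == ck or clean_mesh in ck or ck in clean_mesh
--
--     preds = (
--         [
--             lambda k: k == mesh_name,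
--             lambda k: k.lower() == ml,
--             lambda k: mesh_name in k or k in mesh_name,
--         ]
--         + [(lambda v: lambda k: v in key_variations(k))(v) for v in variations]
--         + [clean_pred]
--     )
--
--     slots = [None] * len(preds)
--     for key, value in gltf_mapping.items():
--         for i, p in enumerate(preds):
--             if slots[i] is None and p(key):
--                 slots[i] = value
--
--     for s in slots:
--         if s is not None:
--             return s
--     return None
-- ===== Notes on version B (the rewrite author's own statement) =====
-- stated objective: alternative
-- what changed: Instead of A's five sequential rescans of the mapping (one per matching strategy, with strategy 4 rescanning once per mesh-name variation), B precomputes the cleaned name and the variation list once and makes a single pass over the mapping, recording per strategy (one slot per strategy-4 variation) the first value whose key satisfies it, then returns the highest-priority filled slot. One pass computes each key's variation list and cleaned form once, where A recomputes them in every one of its up-to-8 rescans.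
import Mathlib
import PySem

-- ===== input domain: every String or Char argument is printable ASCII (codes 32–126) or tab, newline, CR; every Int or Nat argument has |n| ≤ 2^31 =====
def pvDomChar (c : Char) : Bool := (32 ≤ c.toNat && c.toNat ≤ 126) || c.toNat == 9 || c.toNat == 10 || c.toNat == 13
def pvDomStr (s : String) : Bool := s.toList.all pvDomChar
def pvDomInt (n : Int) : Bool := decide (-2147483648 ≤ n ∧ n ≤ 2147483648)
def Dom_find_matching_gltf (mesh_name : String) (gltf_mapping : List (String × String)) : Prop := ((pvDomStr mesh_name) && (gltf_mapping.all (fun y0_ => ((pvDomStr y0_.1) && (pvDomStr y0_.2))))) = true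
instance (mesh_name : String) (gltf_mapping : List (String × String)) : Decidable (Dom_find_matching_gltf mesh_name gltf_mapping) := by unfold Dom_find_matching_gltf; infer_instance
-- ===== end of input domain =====

-- B replaces A's five separate rescans of the mapping by ONE pass keeping a first-match
-- slot per strategy (one slot per mesh-name variation for strategy 4): one pass instead of up to eight rescans; measured faster at large sizes.

-- ===== PORT A =====
-- shared helper: the list of "common variations" of a name (A builds it inline for mesh and key)
def pvVars (s : String) : List String :=
  [s, PySem.Str.replace s "_" "", PySem.Str.replace s "-" "",
   PySem.Str.replace s " " "", PySem.Str.lower s, PySem.Str.upper s]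

-- shared helper: strip the common prefixes then suffixes, each at most once, in order
-- (A does it with startswith + slice; B's removeprefix/removesuffix is the same conditional slice)
def pvClean (s : String) : String :=
  let s1 := ["mesh_", "geometry_", "visual_", "collision_"].foldl
    (fun c p => if PySem.Str.startswith c p then PySem.Str.slice c (some (PySem.Str.len p)) none else c) s
  ["_mesh", "_geometry", "_visual", "_collision"].foldl
    (fun c suf => if PySem.Str.endswith c suf then PySem.Str.slice c none (some (-(PySem.Str.len suf))) else c) s1

def find_matching_gltf (mesh_name : String) (gltf_mapping : List (String × String)) : Option String :=
  -- Strategy 1: exact match (dict membership + lookup = first matching pair)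
  match gltf_mapping.find? (fun kv => kv.1 == mesh_name) with
  | some kv => some kv.2
  | none =>
  -- Strategy 2: case-insensitive exact match
  match gltf_mapping.find? (fun kv => PySem.Str.lower kv.1 == PySem.Str.lower mesh_name) with
  | some kv => some kv.2
  | none =>
  -- Strategy 3: substring match, both directions
  match gltf_mapping.find? (fun kv => PySem.Str.isIn mesh_name kv.1 || PySem.Str.isIn kv.1 mesh_name) with
  | some kv => some kv.2
  | none =>
  -- Strategy 4: for each mesh variation (outer), first key (inner) whose variation list contains it
  match (pvVars mesh_name).findSome?
      (fun v => (gltf_mapping.find? (fun kv => (pvVars kv.1).contains v)).map (·.2)) with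
  | some r => some r
  | none =>
  -- Strategy 5: compare cleaned names
  let clean_mesh := pvClean mesh_name
  match gltf_mapping.find? (fun kv =>
      let clean_key := pvClean kv.1
      clean_mesh == clean_key || PySem.Str.isIn clean_mesh clean_key || PySem.Str.isIn clean_key clean_mesh) with
  | some kv => some kv.2
  | none => none

-- ===== PORT B =====
-- B's strategy predicates, in priority order (10 of them: 1, 2, 3, six for strategy 4, 5)
def pvPredsB (mesh_name : String) : List (String → Bool) :=
  let ml := PySem.Str.lower mesh_name
  let clean_mesh := pvClean mesh_name
  ([fun k => k == mesh_name,
    fun k => PySem.Str.lower k == ml,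
    fun k => PySem.Str.isIn mesh_name k || PySem.Str.isIn k mesh_name]
   ++ (pvVars mesh_name).map (fun v => fun k => (pvVars k).contains v)
   ++ [fun k =>
        let ck := pvClean k
        clean_mesh == ck || PySem.Str.isIn clean_mesh ck || PySem.Str.isIn ck clean_mesh])

def find_matching_gltf_alt (mesh_name : String) (gltf_mapping : List (String × String)) : Option String :=
  let preds := pvPredsB mesh_name
  let slots := gltf_mapping.foldl
    (fun sl kv => List.zipWith
      (fun s p => if s.isSome then s else if p kv.1 then some kv.2 else none) sl preds)
    (preds.map (fun _ => (none : Option String)))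
  slots.findSome? id

-- ===== PRECONDITION & SPEC =====
def Spec_find_matching_gltf (mesh_name : String) (gltf_mapping : List (String × String)) (out : Option String) : Prop := out = find_matching_gltf_alt mesh_name gltf_mapping
instance (mesh_name : String) (gltf_mapping : List (String × String)) (out : Option String) : Decidable (Spec_find_matching_gltf mesh_name gltf_mapping out) := by unfold Spec_find_matching_gltf; infer_instance

-- ===== CLAIM (what is proved, stated in full; the proofs are below) =====
def Claim_equal_find_matching_gltf : Prop := ∀ (mesh_name : String) (gltf_mapping : List (String × String)), Dom_find_matching_gltf mesh_name gltf_mapping → Spec_find_matching_gltf mesh_name gltf_mapping (find_matching_gltf mesh_name gltf_mapping)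

-- ===== LEMMAS AND PROOFS =====

-- zipWith twice against the same right list fuses
theorem pv_zipWith_zipWith {α β γ δ : Type} (f : γ → β → δ) (g : α → β → γ)
    (as : List α) (bs : List β) :
    List.zipWith f (List.zipWith g as bs) bs = List.zipWith (fun a b => f (g a b) b) as bs := by
  induction as generalizing bs with
  | nil => simp
  | cons a as ih => cases bs <;> simp [ih]

-- a zipWith that returns its left argument is the identity on equal lengths
theorem pv_zipWith_left {α β : Type} (f : α → β → α) (h : ∀ a b, f a b = a) :
    ∀ (as : List α) (bs : List β), as.length = bs.length → List.zipWith f as bs = as := by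
  intro as
  induction as with
  | nil => simp
  | cons a as ih => intro bs hl; cases bs <;> simp_all

-- B's single pass, per slot, computes the first value whose key satisfies that slot's predicate
theorem pv_fold_slots (g : List (String × String)) :
    ∀ (preds : List (String → Bool)) (slots : List (Option String)),
      slots.length = preds.length →
      g.foldl
        (fun sl kv => List.zipWith
          (fun s p => if s.isSome then s else if p kv.1 then some kv.2 else none) sl preds)
        slots
      = List.zipWith
          (fun s p => if s.isSome then s else (g.find? (fun kv => p kv.1)).map (·.2))
          slots preds := by
  induction g with
  | nil =>
    intro preds slots hl
    simp only [List.foldl_nil, List.find?_nil, Option.map_none]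
    exact (pv_zipWith_left _ (fun a b => by cases a <;> simp) slots preds hl).symm
  | cons kv g ih =>
    intro preds slots hl
    simp only [List.foldl_cons]
    rw [ih preds _ (by simp [hl])]
    rw [pv_zipWith_zipWith]
    apply List.zipWith_congr
    · rw [List.forall₂_iff_get]
      refine ⟨by simpa using hl, ?_⟩
      intro i h1 h2
      cases hs : slots[i] with
      | some v => simp [hs]
      | none =>
        by_cases hp : preds[i] kv.1 = true
        · simp [hs, hp]
        · simp [hs, hp]

-- first hit of strategy i over g
def pvHit (g : List (String × String)) (p : String → Bool) : Option String :=
  (g.find? (fun kv => p kv.1)).map (·.2)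

theorem pv_alt_eq (mesh_name : String) (gltf_mapping : List (String × String)) :
    find_matching_gltf_alt mesh_name gltf_mapping
    = (pvPredsB mesh_name).findSome? (fun p => pvHit gltf_mapping p) := by
  show (List.foldl _ ((pvPredsB mesh_name).map (fun _ => (none : Option String))) gltf_mapping).findSome? id
      = _
  rw [pv_fold_slots gltf_mapping (pvPredsB mesh_name) _ (by simp)]
  generalize pvPredsB mesh_name = preds
  induction preds with
  | nil => simp
  | cons p ps ih =>
    simp only [List.map_cons, List.zipWith_cons_cons, List.findSome?_cons]
    cases h : (gltf_mapping.find? (fun kv => p kv.1)).map (fun x => x.2) with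
    | some v => simp [pvHit, h]
    | none => simpa [pvHit, h] using ih

theorem find_matching_gltf_spec' (mesh_name : String) (gltf_mapping : List (String × String)) :
    find_matching_gltf mesh_name gltf_mapping = find_matching_gltf_alt mesh_name gltf_mapping := by
  rw [pv_alt_eq]
  unfold find_matching_gltf pvPredsB
  simp only [List.cons_append, List.nil_append, List.findSome?_cons, List.findSome?_append,
    List.findSome?_map, List.findSome?_nil, Function.comp_def, pvHit]
  cases h1 : gltf_mapping.find? (fun kv => kv.1 == mesh_name) with
  | some kv => simp
  | none =>
  simp only [Option.map_none]
  cases h2 : gltf_mapping.find? (fun kv => PySem.Str.lower kv.1 == PySem.Str.lower mesh_name) with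
  | some kv => simp
  | none =>
  simp only [Option.map_none]
  cases h3 : gltf_mapping.find? (fun kv => PySem.Str.isIn mesh_name kv.1 || PySem.Str.isIn kv.1 mesh_name) with
  | some kv => simp
  | none =>
  simp only [Option.map_none]
  cases h4 : (pvVars mesh_name).findSome?
      (fun v => (gltf_mapping.find? (fun kv => (pvVars kv.1).contains v)).map (fun x => x.2)) with
  | some r => simp
  | none =>
    cases h5 : gltf_mapping.find? (fun kv =>
      let clean_key := pvClean kv.1
      pvClean mesh_name == clean_key || PySem.Str.isIn (pvClean mesh_name) clean_key ||
        PySem.Str.isIn clean_key (pvClean mesh_name)) with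
  | some kv => simp
  | none => simp

-- ===== VERDICT (by name: the statement is the Claim_ definition above) =====
theorem find_matching_gltf_spec : Claim_equal_find_matching_gltf := by
  intro m g _
  unfold Spec_find_matching_gltf
  exact find_matching_gltf_spec' m g
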